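-- pv_equiv track=rewrite | github.com/RegionallyFamous/fifty | bin/design_unblock.py | _allowed_commands_for_categories
-- ===== SOURCE A (Python) =====
-- def _allowed_commands_for_categories(categories: list[str]) -> list[str]:
--     commands = {"check_quick", "check_only"}
--     if any(
--         c in categories
--         for c in {
--             "placeholder-images",
--             "snap-evidence-stale",
--             "snap-a11y-color-contrast",
--             "screenshot-duplicate",
--             "design-score-low",
--         }
--     ):
--         commands.add("snap_routes")
--         commands.add("snap_report")
--     if any(c in categories for c in {"factory-timeout", "factory-stall"}):
--         commands.add("snap_report")
--     if any(c in categories for c in {"product-photo-duplicate", "cross-theme-product-images"}):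
--         commands.add("generate_product_photos")
--     if "screenshot-duplicate" in categories:
--         commands.add("build_screenshot")
--     if "design-score-low" in categories:
--         commands.add("design_scorecard")
--     commands.add("sync_playground")
--     commands.add("build_index")
--     return sorted(commands)
-- ===== SOURCE B (Python) =====
-- _BASE = {"check_quick", "check_only", "sync_playground", "build_index"}
-- _SNAP = {"snap_routes", "snap_report"}
-- _TABLE = {
--     "placeholder-images": _SNAP,
--     "snap-evidence-stale": _SNAP,
--     "snap-a11y-color-contrast": _SNAP,
--     "screenshot-duplicate": _SNAP | {"build_screenshot"},
--     "design-score-low": _SNAP | {"design_scorecard"},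
--     "factory-timeout": {"snap_report"},
--     "factory-stall": {"snap_report"},
--     "product-photo-duplicate": {"generate_product_photos"},
--     "cross-theme-product-images": {"generate_product_photos"},
-- }
--
-- def _allowed_commands_for_categories(categories: list[str]) -> list[str]:
--     commands = set(_BASE)
--     for c in categories:
--         commands |= _TABLE.get(c, set())
--     return sorted(commands)
-- ===== Notes on version B (the rewrite author's own statement) =====
-- stated objective: simpler
-- what changed: Replaces A's five separate any-scans/membership tests over the category list by a static category-to-commands table and a single pass that unions the looked-up command set for each category into an always-on base set.
import Mathlib
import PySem

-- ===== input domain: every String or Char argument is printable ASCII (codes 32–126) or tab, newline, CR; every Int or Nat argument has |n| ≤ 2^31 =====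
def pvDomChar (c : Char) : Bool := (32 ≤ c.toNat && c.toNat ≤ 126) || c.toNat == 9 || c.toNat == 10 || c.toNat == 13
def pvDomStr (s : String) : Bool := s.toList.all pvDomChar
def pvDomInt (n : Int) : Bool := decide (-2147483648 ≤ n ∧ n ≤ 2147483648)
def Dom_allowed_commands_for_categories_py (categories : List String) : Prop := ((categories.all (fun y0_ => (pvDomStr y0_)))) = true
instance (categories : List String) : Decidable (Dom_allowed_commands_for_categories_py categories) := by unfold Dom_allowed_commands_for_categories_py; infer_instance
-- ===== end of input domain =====

-- B replaces A's five any-scans over the category list by a single pass driven by a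
-- static category→commands table (objective: simpler).

-- ===== PORT A =====
def allowed_commands_for_categories_py (categories : List String) : List String :=
  let commands : PySem.Set String := PySem.Set.ofList ["check_quick", "check_only"]
  let commands :=
    if (["placeholder-images", "snap-evidence-stale", "snap-a11y-color-contrast",
         "screenshot-duplicate", "design-score-low"].any (fun c => categories.contains c))
    then PySem.Set.add (PySem.Set.add commands "snap_routes") "snap_report" else commands
  let commands :=
    if (["factory-timeout", "factory-stall"].any (fun c => categories.contains c))
    then PySem.Set.add commands "snap_report" else commands
  let commands :=
    if (["product-photo-duplicate", "cross-theme-product-images"].any (fun c => categories.contains c))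
    then PySem.Set.add commands "generate_product_photos" else commands
  let commands := if categories.contains "screenshot-duplicate"
    then PySem.Set.add commands "build_screenshot" else commands
  let commands := if categories.contains "design-score-low"
    then PySem.Set.add commands "design_scorecard" else commands
  let commands := PySem.Set.add (PySem.Set.add commands "sync_playground") "build_index"
  PySem.List.sorted commands (fun x => x) false

-- ===== PORT B =====
def pvTable : PySem.Dict String (List String) :=
  PySem.Dict.ofList
  [("placeholder-images", ["snap_routes", "snap_report"]),
   ("snap-evidence-stale", ["snap_routes", "snap_report"]),
   ("snap-a11y-color-contrast", ["snap_routes", "snap_report"]),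
   ("screenshot-duplicate", ["snap_routes", "snap_report", "build_screenshot"]),
   ("design-score-low", ["snap_routes", "snap_report", "design_scorecard"]),
   ("factory-timeout", ["snap_report"]),
   ("factory-stall", ["snap_report"]),
   ("product-photo-duplicate", ["generate_product_photos"]),
   ("cross-theme-product-images", ["generate_product_photos"])]

def allowed_commands_for_categories_py_alt (categories : List String) : List String :=
  let base : PySem.Set String :=
    PySem.Set.ofList ["check_quick", "check_only", "sync_playground", "build_index"]
  let commands := categories.foldl (fun s c => PySem.Set.update s (PySem.Dict.getD pvTable c [])) base
  PySem.List.sorted commands (fun x => x) false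

-- ===== PRECONDITION & SPEC =====
def Spec_allowed_commands_for_categories_py (categories : List String) (out : List String) : Prop := out = allowed_commands_for_categories_py_alt categories
instance (categories : List String) (out : List String) : Decidable (Spec_allowed_commands_for_categories_py categories out) := by unfold Spec_allowed_commands_for_categories_py; infer_instance

-- ===== CLAIM (what is proved, stated in full; the proofs are below) =====
def Claim_equal_allowed_commands_for_categories_py : Prop := ∀ (categories : List String), Dom_allowed_commands_for_categories_py categories → Spec_allowed_commands_for_categories_py categories (allowed_commands_for_categories_py categories)

-- ===== LEMMAS AND PROOFS =====

theorem mem_foldl_update (l : List String) (s : PySem.Set String) (hs : List.Nodup s) (y : String) :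
    (y ∈ l.foldl (fun s c => PySem.Set.update s (PySem.Dict.getD pvTable c [])) s ↔
      y ∈ s ∨ ∃ c ∈ l, y ∈ PySem.Dict.getD pvTable c []) ∧
    (l.foldl (fun s c => PySem.Set.update s (PySem.Dict.getD pvTable c [])) s).Nodup := by
  induction l generalizing s with
  | nil => simpa using hs
  | cons c l ih =>
    have h := ih (PySem.Set.update s (PySem.Dict.getD pvTable c [])) (PySem.Set.nodup_update _ _ hs)
    constructor
    · rw [List.foldl_cons, h.1, PySem.Set.mem_update]
      constructor
      · rintro ((h | h) | ⟨d, hd, hyd⟩)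
        · exact Or.inl h
        · exact Or.inr ⟨c, List.mem_cons_self, h⟩
        · exact Or.inr ⟨d, List.mem_cons_of_mem _ hd, hyd⟩
      · rintro (h | ⟨d, hd, hyd⟩)
        · exact Or.inl (Or.inl h)
        · rcases List.mem_cons.1 hd with rfl | hd
          · exact Or.inl (Or.inr hyd)
          · exact Or.inr ⟨d, hd, hyd⟩
    · exact h.2

theorem items_pvTable : PySem.Dict.items pvTable =
  [("placeholder-images", ["snap_routes", "snap_report"]),
   ("snap-evidence-stale", ["snap_routes", "snap_report"]),
   ("snap-a11y-color-contrast", ["snap_routes", "snap_report"]),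
   ("screenshot-duplicate", ["snap_routes", "snap_report", "build_screenshot"]),
   ("design-score-low", ["snap_routes", "snap_report", "design_scorecard"]),
   ("factory-timeout", ["snap_report"]),
   ("factory-stall", ["snap_report"]),
   ("product-photo-duplicate", ["generate_product_photos"]),
   ("cross-theme-product-images", ["generate_product_photos"])] := by rfl

set_option maxHeartbeats 1000000 in
theorem mem_table (c y : String) :
    y ∈ PySem.Dict.getD pvTable c [] ↔
      (c = "placeholder-images" ∨ c = "snap-evidence-stale" ∨ c = "snap-a11y-color-contrast") ∧
        (y = "snap_routes" ∨ y = "snap_report") ∨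
      c = "screenshot-duplicate" ∧ (y = "snap_routes" ∨ y = "snap_report" ∨ y = "build_screenshot") ∨
      c = "design-score-low" ∧ (y = "snap_routes" ∨ y = "snap_report" ∨ y = "design_scorecard") ∨
      (c = "factory-timeout" ∨ c = "factory-stall") ∧ y = "snap_report" ∨
      (c = "product-photo-duplicate" ∨ c = "cross-theme-product-images") ∧ y = "generate_product_photos" := by
  by_cases h1 : c = "placeholder-images"
  · subst h1
    rw [show PySem.Dict.getD pvTable "placeholder-images" [] = ["snap_routes", "snap_report"] from rfl]
    simp
  by_cases h2 : c = "snap-evidence-stale"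
  · subst h2
    rw [show PySem.Dict.getD pvTable "snap-evidence-stale" [] = ["snap_routes", "snap_report"] from rfl]
    simp
  by_cases h3 : c = "snap-a11y-color-contrast"
  · subst h3
    rw [show PySem.Dict.getD pvTable "snap-a11y-color-contrast" [] = ["snap_routes", "snap_report"] from rfl]
    simp
  by_cases h4 : c = "screenshot-duplicate"
  · subst h4
    rw [show PySem.Dict.getD pvTable "screenshot-duplicate" [] = ["snap_routes", "snap_report", "build_screenshot"] from rfl]
    simp
  by_cases h5 : c = "design-score-low"
  · subst h5
    rw [show PySem.Dict.getD pvTable "design-score-low" [] = ["snap_routes", "snap_report", "design_scorecard"] from rfl]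
    simp
  by_cases h6 : c = "factory-timeout"
  · subst h6
    rw [show PySem.Dict.getD pvTable "factory-timeout" [] = ["snap_report"] from rfl]
    simp
  by_cases h7 : c = "factory-stall"
  · subst h7
    rw [show PySem.Dict.getD pvTable "factory-stall" [] = ["snap_report"] from rfl]
    simp
  by_cases h8 : c = "product-photo-duplicate"
  · subst h8
    rw [show PySem.Dict.getD pvTable "product-photo-duplicate" [] = ["generate_product_photos"] from rfl]
    simp
  by_cases h9 : c = "cross-theme-product-images"
  · subst h9
    rw [show PySem.Dict.getD pvTable "cross-theme-product-images" [] = ["generate_product_photos"] from rfl]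
    simp
  have hfind : List.find? (fun p => p.1 == c) (PySem.Dict.items pvTable) = none := by
    rw [items_pvTable, List.find?_eq_none]
    intro p hp
    simp only [List.mem_cons, List.not_mem_nil, or_false] at hp
    rcases hp with rfl | rfl | rfl | rfl | rfl | rfl | rfl | rfl | rfl <;>
      simp [Ne.symm h1, Ne.symm h2, Ne.symm h3, Ne.symm h4, Ne.symm h5, Ne.symm h6, Ne.symm h7,
            Ne.symm h8, Ne.symm h9]
  have hnil : PySem.Dict.getD pvTable c [] = ([] : List String) := by
    simp [PySem.Dict.getD, PySem.Dict.get?, hfind]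
  simp [hnil, h1, h2, h3, h4, h5, h6, h7, h8, h9]

theorem exists_table (categories : List String) (y : String) :
    (∃ c ∈ categories, y ∈ PySem.Dict.getD pvTable c []) ↔
      ("placeholder-images" ∈ categories ∨ "snap-evidence-stale" ∈ categories ∨
        "snap-a11y-color-contrast" ∈ categories ∨ "screenshot-duplicate" ∈ categories ∨
        "design-score-low" ∈ categories) ∧ (y = "snap_routes" ∨ y = "snap_report") ∨
      ("factory-timeout" ∈ categories ∨ "factory-stall" ∈ categories) ∧ y = "snap_report" ∨
      ("product-photo-duplicate" ∈ categories ∨ "cross-theme-product-images" ∈ categories) ∧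
        y = "generate_product_photos" ∨
      "screenshot-duplicate" ∈ categories ∧ y = "build_screenshot" ∨
      "design-score-low" ∈ categories ∧ y = "design_scorecard" := by
  constructor
  · rintro ⟨c, hc, hy⟩
    rw [mem_table] at hy
    rcases hy with ⟨(rfl | rfl | rfl), hy⟩ | ⟨rfl, hy⟩ | ⟨rfl, hy⟩ | ⟨(rfl | rfl), rfl⟩ |
      ⟨(rfl | rfl), rfl⟩ <;> tauto
  · rintro (⟨h, hy⟩ | ⟨h, rfl⟩ | ⟨h, rfl⟩ | ⟨h, rfl⟩ | ⟨h, rfl⟩)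
    · rcases h with h | h | h | h | h <;> exact ⟨_, h, by rw [mem_table]; tauto⟩
    · rcases h with h | h <;> exact ⟨_, h, by rw [mem_table]; tauto⟩
    · rcases h with h | h <;> exact ⟨_, h, by rw [mem_table]; tauto⟩
    · exact ⟨_, h, by rw [mem_table]; tauto⟩
    · exact ⟨_, h, by rw [mem_table]; tauto⟩

set_option maxHeartbeats 1000000 in
theorem allowed_commands_for_categories_py_spec : Claim_equal_allowed_commands_for_categories_py := by
  intro categories _
  unfold Spec_allowed_commands_for_categories_py
  unfold allowed_commands_for_categories_py allowed_commands_for_categories_py_alt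
  have hB := mem_foldl_update categories
    (PySem.Set.ofList ["check_quick", "check_only", "sync_playground", "build_index"])
    (PySem.Set.nodup_ofList _)
  rw [PySem.List.sorted_id_eq_sorted_id_iff_perm]
  apply (List.perm_ext_iff_of_nodup ?_ (hB "").2).2
  · intro y
    rw [(hB y).1]
    simp only [PySem.Set.mem_add, PySem.Set.mem_ofList, List.any_eq_true, List.contains_iff_mem]
    rw [exists_table]
    split_ifs <;> simp_all <;> tauto
  · -- A's set is Nodup
    split_ifs <;> (repeat' apply PySem.Set.nodup_add) <;> exact PySem.Set.nodup_ofList _
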